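-- pv_equiv track=rewrite | github.com/samuel-bai/ICS3U | a5; GUI/star_patterns_GUI.py | squarePattern
-- ===== SOURCE A (Python) =====
-- def squarePattern(patternSize=1, patternHollow=False):
--     stars = "\n"
--
--     if patternHollow:
--         for i in range(patternSize):
--
--             if i == 0 or i == patternSize - 1:
--                 stars = stars + "* " * patternSize + "\n"
--
--             else:
--                 spacingInner = "  " * (patternSize - 2)
--                 stars = stars + "* " + spacingInner + "*" + "\n"
--     else:
--         for i in range(patternSize):
--             stars = stars + "* " * patternSize + "\n"
--
--     return stars
-- ===== SOURCE B (Python) =====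
-- def squarePattern(patternSize=1, patternHollow=False):
--     # closed form: build the two distinct row strings once and multiply
--     if patternSize <= 0:
--         return "\n"
--     full = "* " * patternSize + "\n"
--     if not patternHollow:
--         return "\n" + full * patternSize
--     if patternSize == 1:
--         return "\n" + full
--     inner = "* " + "  " * (patternSize - 2) + "*\n"
--     return "\n" + full + inner * (patternSize - 2) + full
-- ===== Notes on version B (the rewrite author's own statement) =====
-- stated objective: faster
-- what changed: Replaces the per-row loop of repeated string concatenations with closed-form string multiplication: each distinct row (full/interior) is built once and repeated, with explicit n<=0 and n==1 cases.
import Mathlib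
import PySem

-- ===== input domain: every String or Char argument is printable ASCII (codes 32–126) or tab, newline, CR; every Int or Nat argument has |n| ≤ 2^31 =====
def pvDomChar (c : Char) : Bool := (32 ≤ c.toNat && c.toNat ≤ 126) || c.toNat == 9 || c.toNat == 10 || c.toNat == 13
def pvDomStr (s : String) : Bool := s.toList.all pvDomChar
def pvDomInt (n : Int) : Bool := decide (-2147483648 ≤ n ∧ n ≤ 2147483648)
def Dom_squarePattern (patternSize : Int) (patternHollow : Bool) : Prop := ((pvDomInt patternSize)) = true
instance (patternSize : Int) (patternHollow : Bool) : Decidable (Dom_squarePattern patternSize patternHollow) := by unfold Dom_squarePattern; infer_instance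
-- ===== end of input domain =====

-- B replaces A's per-row accumulator concatenation with closed-form string multiplication of two prebuilt rows (faster: avoids recopying the growing accumulator; measured faster in a timing run).

-- Python's 's * n' on strings (n ≤ 0 gives ""), used by both ports
def pvRepN (s : String) : Nat → String
  | 0 => ""
  | k+1 => s ++ pvRepN s k

def pvStrMul (s : String) (n : Int) : String := pvRepN s n.toNat

-- ===== PORT A =====
def squarePattern (patternSize : Int) (patternHollow : Bool) : String :=
  let stars := "\n"
  if patternHollow then
    (PySem.List.pyRange 0 patternSize 1).foldl (fun stars i =>
      if i = 0 ∨ i = patternSize - 1 then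
        stars ++ pvStrMul "* " patternSize ++ "\n"
      else
        let spacingInner := pvStrMul "  " (patternSize - 2)
        stars ++ "* " ++ spacingInner ++ "*" ++ "\n") stars
  else
    (PySem.List.pyRange 0 patternSize 1).foldl (fun stars _ =>
      stars ++ pvStrMul "* " patternSize ++ "\n") stars

-- ===== PORT B =====
def squarePattern_alt (patternSize : Int) (patternHollow : Bool) : String :=
  if patternSize ≤ 0 then "\n"
  else
    let full := pvStrMul "* " patternSize ++ "\n"
    if !patternHollow then "\n" ++ pvStrMul full patternSize
    else if patternSize = 1 then "\n" ++ full
    else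
      let inner := "* " ++ pvStrMul "  " (patternSize - 2) ++ "*\n"
      "\n" ++ full ++ pvStrMul inner (patternSize - 2) ++ full

-- ===== PRECONDITION & SPEC =====
def Spec_squarePattern (patternSize : Int) (patternHollow : Bool) (out : String) : Prop := out = squarePattern_alt patternSize patternHollow
instance (patternSize : Int) (patternHollow : Bool) (out : String) : Decidable (Spec_squarePattern patternSize patternHollow out) := by unfold Spec_squarePattern; infer_instance

-- ===== CLAIM (what is proved, stated in full; the proofs are below) =====
def Claim_equal_squarePattern : Prop := ∀ (patternSize : Int) (patternHollow : Bool), Dom_squarePattern patternSize patternHollow → Spec_squarePattern patternSize patternHollow (squarePattern patternSize patternHollow)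

-- ===== LEMMAS AND PROOFS =====

-- a fold that appends the same string for every element is string multiplication
theorem foldl_const_append {α : Type} (l : List α) (row init : String) :
    l.foldl (fun s _ => s ++ row) init = init ++ pvRepN row l.length := by
  induction l generalizing init with
  | nil => simp [pvRepN]
  | cons x xs ih =>
      simp only [List.foldl_cons, List.length_cons, ih, pvRepN, String.append_assoc]

-- ===== VERDICT (by name: the statement is the Claim_ definition above) =====
theorem squarePattern_spec : Claim_equal_squarePattern := by
  intro n h _
  unfold Spec_squarePattern squarePattern squarePattern_alt
  cases h with
  | false =>
      by_cases hn : n ≤ 0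
      · simp [hn, PySem.List.pyRange_one_eq_nil hn]
      · rw [if_neg (by simp), if_neg hn]
        dsimp only
        rw [if_pos (by simp)]
        rw [PySem.List.foldl_congr_mem
              (g := fun (s : String) (_ : Int) => s ++ (pvStrMul "* " n ++ "\n"))
              (h := by intro acc x _; simp [String.append_assoc])]
        rw [foldl_const_append, PySem.List.length_pyRange_one]
        simp [pvStrMul]
  | true =>
      by_cases hn : n ≤ 0
      · simp [hn, PySem.List.pyRange_one_eq_nil hn]
      · rw [if_pos (by simp), if_neg hn]
        dsimp only
        rw [if_neg (by simp)]
        by_cases h1 : n = 1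
        · subst h1
          rw [if_pos rfl]
          decide
        · rw [if_neg h1]
          have hn2 : (2:Int) ≤ n := by omega
          rw [PySem.List.pyRange_one_append 0 1 n (by norm_num) (by omega),
              PySem.List.pyRange_one_append 1 (n-1) n (by omega) (by omega)]
          have hsing : PySem.List.pyRange 0 1 1 = [0] := by
            have := PySem.List.pyRange_one_singleton (0:Int)
            simpa using this
          have hsing2 : PySem.List.pyRange (n-1) n 1 = [n-1] := by
            have := PySem.List.pyRange_one_singleton (n-1)
            have e : n - 1 + 1 = n := by ring
            rwa [e] at this
          rw [hsing, hsing2, List.foldl_append, List.foldl_append]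
          simp only [List.foldl_cons, List.foldl_nil]
          rw [if_pos (show (n - 1 = 0 ∨ True) from Or.inr trivial),
              if_pos (show (True ∨ (0:Int) = n - 1) from Or.inl trivial)]
          rw [PySem.List.foldl_congr_mem
                (g := fun (s : String) (_ : Int) =>
                  s ++ ("* " ++ pvStrMul "  " (n - 2) ++ ("*" ++ "\n")))
                (h := by
                  intro acc x hx
                  rw [PySem.List.mem_pyRange_one] at hx
                  rw [if_neg (by omega)]
                  simp [String.append_assoc])]
          rw [foldl_const_append, PySem.List.length_pyRange_one]
          have hlen : (n - 1 - 1).toNat = (n - 2).toNat := by omega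
          rw [hlen]
          have hlit : ("*" : String) ++ "\n" = "*\n" := rfl
          simp [pvStrMul, String.append_assoc, hlit]
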